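-- pv_equiv track=rewrite | github.com/saisrim29/pythonProject | codingtest.py | combineList
-- ===== SOURCE A (Python) =====
-- def combineList(t1,t2):
--     t3 = []
--     for i in t1:
--         for j in range(len(t2)):
--             if(type(i) is type(t2[j])):
--                 t3.append(i+t2[j])
--                 t2.remove(t2[j])
--                 break
--     return t3
-- ===== SOURCE B (Python) =====
-- def combineList(t1, t2):
--     return [a + b for a, b in zip(t1, t2)]
-- ===== Notes on version B (the rewrite author's own statement) =====
-- stated objective: faster
-- what changed: Since both lists hold ints the type test always matches the current head of t2, so the nested scan-and-remove collapses to a single zip adding t1 to t2 elementwise, truncating at the shorter list; B also does not mutate t2 (A empties t2's prefix in place, noted in the header).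
import Mathlib
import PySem

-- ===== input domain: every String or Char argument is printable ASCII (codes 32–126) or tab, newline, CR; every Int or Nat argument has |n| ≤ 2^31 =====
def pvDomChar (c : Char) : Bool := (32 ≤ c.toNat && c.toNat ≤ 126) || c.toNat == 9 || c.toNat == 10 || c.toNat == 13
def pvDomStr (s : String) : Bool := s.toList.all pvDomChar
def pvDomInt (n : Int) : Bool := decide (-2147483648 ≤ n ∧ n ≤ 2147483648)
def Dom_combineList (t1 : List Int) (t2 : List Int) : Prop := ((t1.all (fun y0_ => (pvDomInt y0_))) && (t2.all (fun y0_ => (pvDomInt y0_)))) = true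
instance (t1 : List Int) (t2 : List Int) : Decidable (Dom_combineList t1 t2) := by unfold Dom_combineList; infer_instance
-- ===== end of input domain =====

-- B replaces A's quadratic scan-and-remove with one zip (the int type test always matches
-- the head of t2); equivalence is about the RETURN value only — Python A also mutates t2
-- in place (removes its consumed prefix), which B does not.

-- ===== PORT A =====
-- inner 'for j in range(len(t2))' with break at the first type match; on List Int the
-- 'type(i) is type(t2[j])' test is always True, ported as the Bool literal 'true'
def pvInnerA (i : Int) (t3 : List Int) (t2 : List Int) : List Int → List Int × List Int
  | [] => (t3, t2)
  | j :: js =>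
    if true then  -- type(i) is type(t2[j]): always True for two ints
      match PySem.List.pyGet? t2 j with
      | some v => (t3 ++ [i + v], (PySem.List.remove? t2 v).getD t2)  -- append, t2.remove(t2[j]), break
      | none => (t3, t2)  -- unreachable: j ∈ range(len(t2))
    else pvInnerA i t3 t2 js

def combineList (t1 : List Int) (t2 : List Int) : List Int :=
  (t1.foldl (fun st i => pvInnerA i st.1 st.2 (PySem.List.pyRange 0 st.2.length 1)) ([], t2)).1

-- ===== PORT B =====
def combineList_alt (t1 : List Int) (t2 : List Int) : List Int :=
  List.zipWith (· + ·) t1 t2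

-- ===== PRECONDITION & SPEC =====
def Spec_combineList (t1 : List Int) (t2 : List Int) (out : List Int) : Prop := out = combineList_alt t1 t2
instance (t1 : List Int) (t2 : List Int) (out : List Int) : Decidable (Spec_combineList t1 t2 out) := by unfold Spec_combineList; infer_instance

-- ===== CLAIM (what is proved, stated in full; the proofs are below) =====
def Claim_equal_combineList : Prop := ∀ (t1 : List Int) (t2 : List Int), Dom_combineList t1 t2 → Spec_combineList t1 t2 (combineList t1 t2)

-- ===== LEMMAS AND PROOFS =====
-- one step of A's outer loop: on nonempty t2 it appends i + head and drops the head
theorem pvInnerA_nil (i : Int) (t3 : List Int) :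
    pvInnerA i t3 [] (PySem.List.pyRange 0 ([] : List Int).length 1) = (t3, []) := by
  simp [pvInnerA]

theorem pvInnerA_cons (i h : Int) (t3 t : List Int) :
    pvInnerA i t3 (h :: t) (PySem.List.pyRange 0 (h :: t).length 1) = (t3 ++ [i + h], t) := by
  rw [PySem.List.pyRange_one_cons (by exact_mod_cast Nat.succ_pos t.length)]
  simp [pvInnerA, PySem.List.pyGet?, PySem.List.pyIdx?]

theorem combineList_foldl (t1 : List Int) : ∀ (t2 t3 : List Int),
    (t1.foldl (fun st i => pvInnerA i st.1 st.2 (PySem.List.pyRange 0 st.2.length 1)) (t3, t2)).1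
      = t3 ++ List.zipWith (· + ·) t1 t2 := by
  induction t1 with
  | nil => intro t2 t3; simp
  | cons i t1 ih =>
    intro t2 t3
    cases t2 with
    | nil =>
      simp only [List.foldl_cons, pvInnerA_nil, List.zipWith_nil_right, List.append_nil]
      have := ih [] t3
      simpa using this
    | cons h t =>
      simp only [List.foldl_cons, pvInnerA_cons, ih t (t3 ++ [i + h]), List.zipWith_cons_cons,
        List.append_assoc, List.singleton_append]

-- ===== VERDICT (by name: the statement is the Claim_ definition above) =====
theorem combineList_spec : Claim_equal_combineList := by
  intro t1 t2 _
  unfold Spec_combineList combineList combineList_alt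
  simpa using combineList_foldl t1 t2 []
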